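-- pv_equiv track=rewrite | github.com/eleven-yun/top-eleven | scripts/backtest_ev.py | compute_longest_losing_streak
-- ===== SOURCE A (Python) =====
-- def compute_longest_losing_streak(results):
--     """Number of consecutive losses in a chronologically-ordered results list.
--
--     Parameters
--     ----------
--     results : list[bool]  True = win, False = loss
--
--     Returns
--     -------
--     int
--     """
--     max_streak = 0
--     current = 0
--     for won in results:
--         if not won:
--             current += 1
--             max_streak = max(max_streak, current)
--         else:
--             current = 0
--     return max_streak
-- ===== SOURCE B (Python) =====
-- def compute_longest_losing_streak(results):
--     """Number of consecutive losses in a chronologically-ordered results list.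
--
--     Run-scan: jump over wins, measure each maximal losing run with an inner
--     scan, and keep the longest run length.
--     """
--     best = 0
--     i = 0
--     n = len(results)
--     while i < n:
--         if results[i]:
--             i += 1
--         else:
--             j = i
--             while j < n and not results[j]:
--                 j += 1
--             if j - i > best:
--                 best = j - i
--             i = j
--     return best
-- ===== Notes on version B (the rewrite author's own statement) =====
-- stated objective: alternative
-- what changed: B replaces A's incremental counter-with-reset fold by a run-scan: it skips wins and measures each maximal losing run with an inner scan, keeping the longest run length.
import Mathlib
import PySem

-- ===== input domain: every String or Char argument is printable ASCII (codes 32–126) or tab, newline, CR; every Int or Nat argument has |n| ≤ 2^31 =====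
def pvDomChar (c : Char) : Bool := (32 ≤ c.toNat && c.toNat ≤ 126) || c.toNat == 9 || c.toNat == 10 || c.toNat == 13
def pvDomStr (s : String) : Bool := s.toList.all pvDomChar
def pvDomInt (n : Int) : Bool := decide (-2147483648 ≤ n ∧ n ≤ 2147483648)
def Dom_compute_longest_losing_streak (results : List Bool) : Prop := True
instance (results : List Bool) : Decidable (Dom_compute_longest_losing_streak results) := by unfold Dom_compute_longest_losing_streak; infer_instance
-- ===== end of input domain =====

-- ===== PORT A =====
-- B is a run-scan (skip wins, measure each maximal losing run) instead of A's
-- counter-that-resets fold; same task, same cost, different decomposition.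
def pvStepA (s : Int × Int) (won : Bool) : Int × Int :=
  if !won then (max s.1 (s.2 + 1), s.2 + 1) else (s.1, 0)

def compute_longest_losing_streak (results : List Bool) : Int :=
  (results.foldl pvStepA (0, 0)).1

-- ===== PORT B =====
-- length of the leading losing run (Source B's inner `while` scan, j - i)
def pvLead : List Bool → Int
  | [] => 0
  | true :: _ => 0
  | false :: xs => 1 + pvLead xs

-- advance past the leading losing run (Source B's `i = j`)
def pvDropRun : List Bool → List Bool
  | [] => []
  | true :: xs => true :: xs
  | false :: xs => pvDropRun xs

theorem pvDropRun_length_le : ∀ (xs : List Bool), (pvDropRun xs).length ≤ xs.length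
  | [] => Nat.le_refl _
  | true :: _ => Nat.le_refl _
  | false :: xs => Nat.le_trans (pvDropRun_length_le xs) (Nat.le_succ _)

-- Source B's outer while-loop over runs
def pvRuns : List Bool → Int
  | [] => 0
  | true :: xs => pvRuns xs
  | false :: xs => max (1 + pvLead xs) (pvRuns (pvDropRun xs))
termination_by xs => xs.length
decreasing_by
  · exact Nat.lt_succ_self _
  · exact Nat.lt_succ_of_le (pvDropRun_length_le xs)

def compute_longest_losing_streak_alt (results : List Bool) : Int :=
  pvRuns results

-- ===== PRECONDITION & SPEC =====
def Spec_compute_longest_losing_streak (results : List Bool) (out : Int) : Prop := out = compute_longest_losing_streak_alt results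
instance (results : List Bool) (out : Int) : Decidable (Spec_compute_longest_losing_streak results out) := by unfold Spec_compute_longest_losing_streak; infer_instance

-- ===== CLAIM (what is proved, stated in full; the proofs are below) =====
def Claim_equal_compute_longest_losing_streak : Prop := ∀ (results : List Bool), Dom_compute_longest_losing_streak results → Spec_compute_longest_losing_streak results (compute_longest_losing_streak results)

-- ===== LEMMAS AND PROOFS =====

-- "best streak given a pending losing run of length c": characterisation both sides meet
def pvG : Int → List Bool → Int
  | c, [] => c
  | c, false :: xs => pvG (c + 1) xs
  | c, true :: xs => max c (pvG 0 xs)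

theorem le_pvG : ∀ (xs : List Bool) (c : Int), c ≤ pvG c xs
  | [], c => le_refl _
  | false :: xs, c => by
      have h := le_pvG xs (c + 1)
      simp only [pvG]; omega
  | true :: xs, c => by simp only [pvG]; omega

theorem foldA_eq : ∀ (xs : List Bool) (m c : Int), 0 ≤ c → c ≤ m →
    (List.foldl pvStepA (m, c) xs).1 = max m (pvG c xs) := by
  intro xs
  induction xs with
  | nil => intro m c _ h; simp only [List.foldl, pvG]; omega
  | cons won xs ih =>
    intro m c hc hm
    cases won with
    | false =>
      have h1 := ih (max m (c + 1)) (c + 1) (by omega) (by omega)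
      have h2 := le_pvG xs (c + 1)
      simp only [List.foldl, pvStepA, pvG, Bool.not_false, if_pos] at *
      omega
    | true =>
      have h1 := ih m 0 (by omega) (by omega)
      have h2 := le_pvG xs (0 : Int)
      simp only [List.foldl, pvStepA, pvG, Bool.not_true, Bool.false_eq_true, if_false] at *
      omega

theorem pvG_split : ∀ (xs : List Bool) (c : Int), 0 ≤ c →
    pvG c xs = max (c + pvLead xs) (pvG 0 (pvDropRun xs)) := by
  intro xs
  induction xs with
  | nil => intro c hc; simp only [pvG, pvLead, pvDropRun]; omega
  | cons won xs ih =>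
    intro c hc
    cases won with
    | false =>
      have h := ih (c + 1) (by omega)
      simp only [pvG, pvLead, pvDropRun] at *
      omega
    | true =>
      have h := le_pvG xs (0 : Int)
      simp only [pvG, pvLead, pvDropRun]
      omega

theorem pvRuns_eq_pvG : ∀ (n : Nat) (xs : List Bool), xs.length ≤ n → pvRuns xs = pvG 0 xs := by
  intro n
  induction n with
  | zero =>
    intro xs h
    cases xs with
    | nil => simp [pvRuns, pvG]
    | cons a xs => simp at h
  | succ n ih =>
    intro xs h
    cases xs with
    | nil => simp [pvRuns, pvG]
    | cons won xs =>
      cases won with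
      | true =>
        have := ih xs (by simpa using Nat.le_of_succ_le_succ h)
        simp only [pvRuns, pvG, this]
        have h2 := le_pvG xs (0 : Int)
        omega
      | false =>
        have hlen : (pvDropRun xs).length ≤ n :=
          Nat.le_trans (pvDropRun_length_le xs) (by simpa using Nat.le_of_succ_le_succ h)
        have hrec := ih (pvDropRun xs) hlen
        have hsplit := pvG_split xs 1 (by omega)
        simp only [pvRuns, pvG, hrec, zero_add]
        omega

-- ===== VERDICT (by name: the statement is the Claim_ definition above) =====
theorem compute_longest_losing_streak_spec : Claim_equal_compute_longest_losing_streak := by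
  intro results _
  unfold Spec_compute_longest_losing_streak compute_longest_losing_streak compute_longest_losing_streak_alt
  have h1 := foldA_eq results 0 0 (by omega) (by omega)
  have h2 := pvRuns_eq_pvG results.length results (Nat.le_refl _)
  have h3 := le_pvG results (0 : Int)
  omega
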